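-- pv_equiv track=rewrite | github.com/udbhav1210/Network-Attack-Automation-Using-Python | net_attack.py | obfuscate
-- ===== SOURCE A (Python) =====
-- def obfuscate(plain_text):
--   # Rotate the plain text
--   rot_text = ""
--   i = len(plain_text)-1
--   while i >= 0:
--     rot_text += plain_text[i]
--     i-=1
--   # Right shift each character in the rotated text by 3
--   cipher_text = ""
--   for char in rot_text:
--     ascii_value = ord(char)
--     ascii_value +=3
--     cipher_text += chr(ascii_value)
--   return cipher_text
-- ===== SOURCE B (Python) =====
-- def obfuscate(plain_text):
--   # Divide and conquer: no reversal pass at all. Recursively obfuscate each half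
--   # and concatenate the right half's cipher before the left half's; a single
--   # character is just shifted by 3. Correct since reverse(x+y)=reverse(y)+reverse(x)
--   # and the +3 shift acts pointwise.
--   n = len(plain_text)
--   if n == 0:
--     return ""
--   if n == 1:
--     return chr(ord(plain_text) + 3)
--   mid = n // 2
--   return obfuscate(plain_text[mid:]) + obfuscate(plain_text[:mid])
-- ===== Notes on version B (the rewrite author's own statement) =====
-- stated objective: faster
-- what changed: Replaces A's two sequential index/accumulator passes (explicit reversal into an intermediate string by repeated concatenation, then a shift loop) with a divide-and-conquer recursion that splits the string in half, shifts single characters at the leaves, and swaps the halves when concatenating, so no reversal pass or intermediate reversed buffer exists.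
import Mathlib
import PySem

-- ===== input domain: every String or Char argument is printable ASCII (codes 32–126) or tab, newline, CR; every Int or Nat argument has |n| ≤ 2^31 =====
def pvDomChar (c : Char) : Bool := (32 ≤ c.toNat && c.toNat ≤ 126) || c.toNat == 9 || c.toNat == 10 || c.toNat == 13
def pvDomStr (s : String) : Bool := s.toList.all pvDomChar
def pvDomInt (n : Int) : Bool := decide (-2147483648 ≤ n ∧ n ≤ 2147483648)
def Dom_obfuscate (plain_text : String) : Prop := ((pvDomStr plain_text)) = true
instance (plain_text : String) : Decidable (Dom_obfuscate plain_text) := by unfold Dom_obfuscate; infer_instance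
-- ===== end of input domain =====

-- B replaces A's two accumulator passes (reverse into an intermediate string, then shift)
-- with a divide-and-conquer recursion: shift single chars at the leaves, concatenate the
-- halves swapped; no reversal pass exists. Objective: faster (no quadratic concatenation).

-- ===== PORT A =====
-- A's first while loop: i runs len-1, len-2, …, 0, appending plain_text[i]; fuel = i+1.
def obfuscateRotAux (cs : List Char) : Nat → List Char
  | 0 => []
  | n + 1 => cs.getD n ' ' :: obfuscateRotAux cs n

def obfuscate (plain_text : String) : String :=
  let cs := plain_text.toList
  -- rot_text: build reversed string by descending-index while loop
  let rot_text := obfuscateRotAux cs cs.length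
  -- cipher_text: for char in rot_text, append chr(ord(char)+3)
  let cipher_text := rot_text.foldl (fun acc c => acc ++ [Char.ofNat (c.toNat + 3)]) []
  String.mk cipher_text

-- ===== PORT B =====
-- Source B's divide-and-conquer on the character list: base cases n = 0 and n = 1,
-- otherwise recurse on drop mid (plain_text[mid:]) and take mid (plain_text[:mid]).
def obfuscateDC (cs : List Char) : List Char :=
  if cs.length = 0 then []
  else if cs.length = 1 then [Char.ofNat ((cs.headD ' ').toNat + 3)]
  else obfuscateDC (cs.drop (cs.length / 2)) ++ obfuscateDC (cs.take (cs.length / 2))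
termination_by cs.length
decreasing_by
  · simp only [List.length_drop]; omega
  · simp only [List.length_take]; omega

def obfuscate_alt (plain_text : String) : String :=
  String.mk (obfuscateDC plain_text.toList)

-- ===== PRECONDITION & SPEC =====
def Spec_obfuscate (plain_text : String) (out : String) : Prop := out = obfuscate_alt plain_text
instance (plain_text : String) (out : String) : Decidable (Spec_obfuscate plain_text out) := by unfold Spec_obfuscate; infer_instance

-- ===== CLAIM =====
def Claim_equal_obfuscate : Prop := ∀ (plain_text : String), Dom_obfuscate plain_text → Spec_obfuscate plain_text (obfuscate plain_text)

-- ===== LEMMAS AND PROOFS =====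
theorem obfuscateRotAux_eq_reverse_take (cs : List Char) (n : Nat) (hn : n ≤ cs.length) :
    obfuscateRotAux cs n = (cs.take n).reverse := by
  induction n with
  | zero => simp [obfuscateRotAux]
  | succ k ih =>
    have hk : k < cs.length := by omega
    have : cs.take (k + 1) = cs.take k ++ [cs[k]] := by
      rw [List.take_succ, List.getElem?_eq_getElem hk]; rfl
    rw [obfuscateRotAux, ih (by omega), this, List.reverse_append]
    simp [List.getD, List.getElem?_eq_getElem hk]

theorem foldl_append_singleton_map (f : Char → Char) (l acc : List Char) :
    l.foldl (fun a c => a ++ [f c]) acc = acc ++ l.map f := by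
  induction l generalizing acc with
  | nil => simp
  | cons c t ih => simp [List.foldl, ih]

theorem obfuscateDC_eq (cs : List Char) :
    obfuscateDC cs = (cs.map (fun c => Char.ofNat (c.toNat + 3))).reverse := by
  induction hn : cs.length using Nat.strong_induction_on generalizing cs with
  | _ n ih =>
    rw [obfuscateDC]
    split
    · next h0 => rw [List.length_eq_zero_iff.mp h0]; simp
    · split
      · next h1 =>
        obtain ⟨c, hc⟩ := List.length_eq_one_iff.mp h1
        subst hc; simp [List.headD]
      · next h0 h1 =>
        have h2 : 2 ≤ cs.length := by omega
        subst hn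
        rw [ih (cs.drop (cs.length / 2)).length (by simp; omega) _ rfl,
            ih (cs.take (cs.length / 2)).length (by simp; omega) _ rfl,
            ← List.reverse_append, ← List.map_append, List.take_append_drop]

-- ===== VERDICT =====
theorem obfuscate_spec : Claim_equal_obfuscate := by
  intro s _
  unfold Spec_obfuscate
  show String.mk ((obfuscateRotAux s.toList s.toList.length).foldl
      (fun acc c => acc ++ [Char.ofNat (c.toNat + 3)]) []) = obfuscate_alt s
  rw [obfuscateRotAux_eq_reverse_take s.toList s.toList.length le_rfl,
      foldl_append_singleton_map]
  unfold obfuscate_alt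
  rw [obfuscateDC_eq, List.nil_append, List.take_length, List.map_reverse]
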